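-- pv_equiv track=rewrite | github.com/pikalaw/algorithm | delete_tree_level.py | RootIndex
-- ===== SOURCE A (Python) =====
-- def RootIndex(values, start, end):
--   """Compute the index of the root of a complete BST.
--
--   The values of the tree are from the sorted list `values` in [start, end).
--   """
--   num_values = end - start
--   tree_size = 1
--   level_size = 1
--   while True:
--     next_level_size = level_size * 2
--     next_tree_size = tree_size + next_level_size
--     if next_tree_size > num_values:
--       break
--     tree_size, level_size = next_tree_size, next_level_size
--   left_over = num_values - tree_size
--   return (start + int((tree_size - 1) / 2) +
--           min(left_over, int(next_level_size / 2)))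
-- ===== SOURCE B (Python) =====
-- def RootIndex(values, start, end):
--   """Closed-form root index of a complete BST over values[start:end)."""
--   n = end - start
--   if n <= 0:
--     # degenerate empty range: truncated formula (base state of the recurrence)
--     return start + n - 1
--   m = (n + 1).bit_length() - 1   # largest m with 2**m - 1 <= n
--   half = 1 << (m - 1)
--   return start + half - 1 + min(n - (2 * half - 1), half)
-- ===== Notes on version B (the rewrite author's own statement) =====
-- stated objective: alternative
-- what changed: Replaces A's level-doubling while-loop with a closed-form computation: the complete-levels count comes from (num_values+1).bit_length() and the root index is direct arithmetic on it; the loop disappears entirely (overall call cost is dominated by argument handling, so no measured speed-up).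
import Mathlib
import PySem

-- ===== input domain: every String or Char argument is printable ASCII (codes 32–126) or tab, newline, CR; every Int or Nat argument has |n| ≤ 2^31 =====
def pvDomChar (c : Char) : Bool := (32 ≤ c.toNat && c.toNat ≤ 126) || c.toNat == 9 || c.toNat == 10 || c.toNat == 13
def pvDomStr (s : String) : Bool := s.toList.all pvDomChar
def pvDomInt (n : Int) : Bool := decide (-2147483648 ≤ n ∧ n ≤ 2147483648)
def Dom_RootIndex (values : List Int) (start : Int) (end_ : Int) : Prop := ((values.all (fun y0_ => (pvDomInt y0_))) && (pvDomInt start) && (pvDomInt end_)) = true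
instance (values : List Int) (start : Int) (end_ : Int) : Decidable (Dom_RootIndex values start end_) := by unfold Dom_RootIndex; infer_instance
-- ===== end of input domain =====

-- B replaces A's doubling loop by closed-form arithmetic from the bit length of num_values+1.

-- ===== PORT A =====
-- A's 'while True' loop; the fuel only makes the recursion total and is never
-- exhausted (the loop runs at most num_values iterations, see RootIndexLoop_fuel).
-- Returns (tree_size, next_level_size) as they stand at the 'break'.
def RootIndexLoop : Nat → Int → Int → Int → Int × Int
  | 0, _, tree_size, level_size => (tree_size, level_size * 2)
  | fuel + 1, num_values, tree_size, level_size =>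
    let next_level_size := level_size * 2
    let next_tree_size := tree_size + next_level_size
    if next_tree_size > num_values then (tree_size, next_level_size)
    else RootIndexLoop fuel num_values next_tree_size next_level_size

def RootIndex (values : List Int) (start : Int) (end_ : Int) : Int :=
  let num_values := end_ - start
  let (tree_size, next_level_size) := RootIndexLoop (num_values.toNat + 1) num_values 1 1
  let left_over := num_values - tree_size
  -- int((tree_size-1)/2) and int(next_level_size/2): exact Int division here,
  -- both numerators are even and non-negative so float truediv + int() is exact.
  start + (tree_size - 1) / 2 + min left_over (next_level_size / 2)

-- ===== PORT B =====
def RootIndex_alt (values : List Int) (start : Int) (end_ : Int) : Int :=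
  let n := end_ - start
  if n ≤ 0 then start + n - 1
  else
    let m := PySem.Int.bitLength (n + 1) - 1   -- largest m with 2^m - 1 ≤ n
    let half : Int := 2 ^ (m - 1)              -- 1 << (m - 1)
    start + half - 1 + min (n - (2 * half - 1)) half

-- ===== PRECONDITION & SPEC =====
def Spec_RootIndex (values : List Int) (start : Int) (end_ : Int) (out : Int) : Prop := out = RootIndex_alt values start end_
instance (values : List Int) (start : Int) (end_ : Int) (out : Int) : Decidable (Spec_RootIndex values start end_ out) := by unfold Spec_RootIndex; infer_instance

-- ===== CLAIM (what is proved, stated in full; the proofs are below) =====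
def Claim_equal_RootIndex : Prop := ∀ (values : List Int) (start : Int) (end_ : Int), Dom_RootIndex values start end_ → Spec_RootIndex values start end_ (RootIndex values start end_)

-- ===== LEMMAS AND PROOFS =====

-- Loop invariant: starting from state (2^k - 1, 2^(k-1)) with 1 ≤ k ≤ M, where M is
-- characterised by 2^M - 1 ≤ n < 2^(M+1) - 1, and enough fuel, the loop ends at (2^M - 1, 2^M).
theorem RootIndexLoop_inv (fuel : Nat) : ∀ (k M : Nat) (n : Int), 1 ≤ k → k ≤ M →
    (2 : Int) ^ M - 1 ≤ n → n < 2 ^ (M + 1) - 1 → M ≤ k + fuel →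
    RootIndexLoop fuel n ((2 : Int) ^ k - 1) (2 ^ (k - 1)) = ((2 : Int) ^ M - 1, 2 ^ M) := by
  induction fuel with
  | zero =>
    intro k M n hk hkM _ _ hfuel
    have hkM' : k = M := by omega
    subst hkM'
    have : (2 : Int) ^ (k - 1) * 2 = 2 ^ k := by
      rw [← pow_succ]; congr 1; omega
    simp [RootIndexLoop, this]
  | succ fuel ih =>
    intro k M n hk hkM hM1 hM2 hfuel
    have hpow : (2 : Int) ^ (k - 1) * 2 = 2 ^ k := by
      rw [← pow_succ]; congr 1; omega
    have hnext : (2 : Int) ^ k - 1 + 2 ^ k = 2 ^ (k + 1) - 1 := by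
      have : (2 : Int) ^ (k + 1) = 2 ^ k * 2 := by rw [pow_succ]
      omega
    by_cases hbr : (2 : Int) ^ k - 1 + 2 ^ (k - 1) * 2 > n
    · -- break: 2^(k+1) - 1 > n forces M = k
      have hklt : n < 2 ^ (k + 1) - 1 := by rw [hpow] at hbr; omega
      have hMk : M = k := by
        by_contra hne
        have hk1M : k + 1 ≤ M := by omega
        have : (2 : Int) ^ (k + 1) ≤ 2 ^ M := pow_le_pow_right₀ (by norm_num) hk1M
        omega
      subst hMk
      simp only [RootIndexLoop]
      rw [if_pos hbr, hpow]
    · -- recurse with k + 1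
      have hle : (2 : Int) ^ (k + 1) - 1 ≤ n := by rw [hpow] at hbr; omega
      have hk1M : k + 1 ≤ M := by
        by_contra hne
        have hMk : M ≤ k := by omega
        have : (2 : Int) ^ M ≤ 2 ^ k := pow_le_pow_right₀ (by norm_num) hMk
        omega
      simp only [RootIndexLoop]
      rw [if_neg hbr, hpow, hnext]
      have := ih (k + 1) M n (by omega) hk1M hM1 hM2 (by omega)
      simpa using this

-- ===== VERDICT (by name: the statement is the Claim_ definition above) =====
theorem RootIndex_spec : Claim_equal_RootIndex := by
  intro values start end_ _
  unfold Spec_RootIndex RootIndex RootIndex_alt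
  set n := end_ - start with hn
  by_cases hle : n ≤ 0
  · -- empty / negative range: loop breaks on the first test
    have h0 : n.toNat = 0 := Int.toNat_of_nonpos hle
    have hbr : (1 : Int) + 1 * 2 > n := by omega
    simp only [h0, RootIndexLoop]
    rw [if_pos hbr]
    simp only [hle, if_pos]
    simp
    omega
  · -- n ≥ 1: characterise M := bitLength (n+1) - 1
    replace hle : 0 < n := by omega
    set M := PySem.Int.bitLength (n + 1) - 1 with hM
    have hn1 : (0 : Int) < n + 1 := by omega
    have habs : (n + 1).natAbs = (n + 1).toNat := by omega
    have hup : (n + 1).natAbs < 2 ^ PySem.Int.bitLength (n + 1) :=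
      PySem.Int.lt_two_pow_bitLength (n + 1)
    have hlo : 2 ^ (PySem.Int.bitLength (n + 1) - 1) ≤ (n + 1).natAbs :=
      PySem.Int.two_pow_bitLength_le (n + 1) (by omega)
    have hBLpos : 1 ≤ PySem.Int.bitLength (n + 1) := by
      by_contra h
      have h0 : PySem.Int.bitLength (n + 1) = 0 := by omega
      rw [h0] at hup; simp at hup; omega
    have hMsucc : M + 1 = PySem.Int.bitLength (n + 1) := by omega
    -- bounds as Int
    have hupI : n + 1 < 2 ^ (M + 1) := by
      rw [hMsucc]
      have : ((n + 1).natAbs : Int) < ((2 : Nat) ^ PySem.Int.bitLength (n + 1) : Nat) := by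
        exact_mod_cast hup
      rw [Int.natAbs_of_nonneg (by omega)] at this
      simpa using this
    have hloI : (2 : Int) ^ M ≤ n + 1 := by
      have : (((2 : Nat) ^ M : Nat) : Int) ≤ ((n + 1).natAbs : Int) := by
        exact_mod_cast (hM ▸ hlo)
      rw [Int.natAbs_of_nonneg (by omega)] at this
      simpa using this
    have hM1 : 1 ≤ M := by
      by_contra h
      have h0 : M = 0 := by omega
      rw [h0] at hupI; norm_num at hupI; omega
    -- enough fuel: M ≤ 1 + (n.toNat + 1)
    have hfuel : M ≤ 1 + (n.toNat + 1) := by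
      have h1 : (M : Int) < 2 ^ M := by exact_mod_cast Nat.lt_two_pow_self
      have h2 : (n : Int) = n.toNat := by omega
      omega
    have hloop := RootIndexLoop_inv (n.toNat + 1) 1 M n le_rfl hM1
      (by omega) (by omega) hfuel
    simp only [pow_one] at hloop
    norm_num at hloop
    simp only [hloop]
    rw [if_neg (by omega : ¬ n ≤ 0)]
    rw [show PySem.Int.bitLength (n + 1) - 1 = M from hM.symm]
    have hhalf : (2 : Int) ^ M = 2 * 2 ^ (M - 1) := by
      rw [← pow_succ']; congr 1; omega
    rw [hhalf]
    have hd1 : (2 * (2 : Int) ^ (M - 1) - 1 - 1) / 2 = 2 ^ (M - 1) - 1 := by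
      have h : 2 * (2 : Int) ^ (M - 1) - 1 - 1 = 2 * (2 ^ (M - 1) - 1) := by ring
      rw [h, Int.mul_ediv_cancel_left _ two_ne_zero]
    have hd2 : 2 * (2 : Int) ^ (M - 1) / 2 = 2 ^ (M - 1) :=
      Int.mul_ediv_cancel_left _ two_ne_zero
    rw [hd1, hd2]
    omega
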